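-- pv_equiv track=rewrite | github.com/milsever/plant-pathology | mixmatch.py | mixmatch_interleave_offsets
-- ===== SOURCE A (Python) =====
-- def mixmatch_interleave_offsets(batch, nu):
--     groups = [batch // (nu + 1)] * (nu + 1)
--     for x in range(batch - sum(groups)):
--         groups[-x - 1] += 1
--     offsets = [0]
--     for g in groups:
--         offsets.append(offsets[-1] + g)
--     assert offsets[-1] == batch
--     return offsets
-- ===== SOURCE B (Python) =====
-- def mixmatch_interleave_offsets(batch, nu):
--     k = nu + 1
--     base, r = divmod(batch, k)
--     threshold = k - r
--     return [i * base + max(0, i - threshold) for i in range(k + 1)]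
-- ===== Notes on version B (the rewrite author's own statement) =====
-- stated objective: simpler
-- what changed: Replaces the mutable groups list, the remainder-distribution loop and the prefix-sum accumulation by a single closed-form comprehension: offset i = i*base + max(0, i - ((nu+1) - batch%(nu+1))).
-- outside the precondition, e.g. on mixmatch_interleave_offsets(0, -2): A returns [0], B returns []
import Mathlib
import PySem

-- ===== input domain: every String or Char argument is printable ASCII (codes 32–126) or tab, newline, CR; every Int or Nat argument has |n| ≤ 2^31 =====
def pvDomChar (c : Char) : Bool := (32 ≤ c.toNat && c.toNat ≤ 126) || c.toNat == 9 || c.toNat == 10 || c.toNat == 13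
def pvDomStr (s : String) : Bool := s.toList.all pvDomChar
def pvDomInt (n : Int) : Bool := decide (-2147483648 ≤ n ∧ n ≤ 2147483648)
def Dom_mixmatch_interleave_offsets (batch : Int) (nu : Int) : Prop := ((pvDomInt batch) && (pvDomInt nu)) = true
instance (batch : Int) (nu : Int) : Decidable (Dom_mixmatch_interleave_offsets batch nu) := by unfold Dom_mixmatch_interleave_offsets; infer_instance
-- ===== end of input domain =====

-- B replaces A's mutable groups list, remainder-distribution loop and prefix-sum accumulation
-- by one closed-form comprehension (simpler); equal on all inputs with nu ≥ 0 (Pre_).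

-- ===== PORT A =====
-- literal transliteration; the 'assert offsets[-1] == batch' always succeeds under Pre_, so it is a no-op here
def mixmatch_interleave_offsets (batch : Int) (nu : Int) : List Int :=
  let groups0 := PySem.List.pyRepeat [PySem.Int.floordiv batch (nu + 1)] (nu + 1)
  let groups := (PySem.List.pyRange 0 (batch - groups0.sum)).foldl
    (fun gs x => PySem.List.pySetD gs (-x - 1) (PySem.List.pyGetD gs (-x - 1) 0 + 1)) groups0
  groups.foldl (fun offs g => offs ++ [PySem.List.pyGetD offs (-1) 0 + g]) [0]

-- ===== PORT B =====
def mixmatch_interleave_offsets_alt (batch : Int) (nu : Int) : List Int :=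
  let k := nu + 1
  let base := PySem.Int.floordiv batch k
  let r := PySem.Int.mod batch k
  let threshold := k - r
  (PySem.List.pyRange 0 (k + 1)).map (fun i => i * base + max 0 (i - threshold))

-- ===== PRECONDITION & SPEC =====
-- Pre_ excludes nu < 0: there A raises (nu = -1 ZeroDivisionError; nu < -1 IndexError for batch > 0,
-- AssertionError for batch < 0) except the accidental corner batch = 0, nu < -1, where A returns [0]
-- only because the empty groups list makes the assert compare 0 == 0.
def Pre_mixmatch_interleave_offsets (batch : Int) (nu : Int) : Prop := 0 ≤ nu
instance (batch : Int) (nu : Int) : Decidable (Pre_mixmatch_interleave_offsets batch nu) := by unfold Pre_mixmatch_interleave_offsets; infer_instance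
def pvWitness_mixmatch_interleave_offsets : Int × Int := (5, 2)

def Spec_mixmatch_interleave_offsets (batch : Int) (nu : Int) (out : List Int) : Prop := out = mixmatch_interleave_offsets_alt batch nu
instance (batch : Int) (nu : Int) (out : List Int) : Decidable (Spec_mixmatch_interleave_offsets batch nu out) := by unfold Spec_mixmatch_interleave_offsets; infer_instance

-- ===== CLAIM (what is proved, stated in full; the proofs are below) =====
def Claim_equal_mixmatch_interleave_offsets : Prop := ∀ (batch : Int) (nu : Int), Dom_mixmatch_interleave_offsets batch nu → Pre_mixmatch_interleave_offsets batch nu → Spec_mixmatch_interleave_offsets batch nu (mixmatch_interleave_offsets batch nu)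

-- ===== LEMMAS AND PROOFS =====

-- prefix sums starting after c (proof-only helper describing A's offsets loop)
def pvPsums (c : Int) : List Int → List Int
  | [] => []
  | g :: gs => (c + g) :: pvPsums (c + g) gs

-- xs[-k] = v for 0 < k ≤ len (no PySem lemma covers a negative-index pySetD)
theorem pvSetD_neg_natCast {α : Type} (xs : List α) (k : Nat) (v : α)
    (h1 : 0 < k) (h2 : k ≤ xs.length) :
    PySem.List.pySetD xs (-(k:Int)) v = xs.set (xs.length - k) v := by
  unfold PySem.List.pySetD PySem.List.pySet? PySem.List.pyIdx?
  rw [if_neg (by omega), if_pos (by omega)]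
  simp

theorem pv_incr_loop (kN rN : Nat) (base : Int) (h : rN ≤ kN) :
    ∀ m : Nat, m ≤ rN →
    (PySem.List.pyRange 0 (m:Int)).foldl
      (fun gs x => PySem.List.pySetD gs (-x - 1) (PySem.List.pyGetD gs (-x - 1) 0 + 1))
      (List.replicate kN base)
    = List.replicate (kN - m) base ++ List.replicate m (base + 1) := by
  intro m
  induction m with
  | zero => intro _; simp [PySem.List.pyRange_one_eq_nil]
  | succ m ih =>
    intro hm
    have hm' : m ≤ rN := Nat.le_of_succ_le hm
    have hcast : ((m + 1 : Nat) : Int) = (m : Int) + 1 := by push_cast; ring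
    rw [hcast, PySem.List.pyRange_one_succ_right (by exact_mod_cast Nat.zero_le m),
        List.foldl_append, ih hm']
    simp only [List.foldl_cons, List.foldl_nil]
    have hlen : (List.replicate (kN - m) base ++ List.replicate m (base + 1)).length = kN := by
      simp; omega
    have hidx : -(m:Int) - 1 = -((m + 1 : Nat) : Int) := by push_cast; ring
    rw [hidx, PySem.List.pyGetD_neg_natCast _ _ _ (by omega) (by rw [hlen]; omega),
        pvSetD_neg_natCast _ _ _ (by omega) (by rw [hlen]; omega)]
    simp only [hlen]
    apply List.ext_getElem
    · simp; omega
    · intro i h1 h2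
      simp only [List.getElem_set, List.getElem_append, List.length_replicate,
        List.getElem_replicate]
      split_ifs <;> simp_all <;> omega

theorem pv_off_loop (gs : List Int) : ∀ (l : List Int) (c : Int),
    gs.foldl (fun offs g => offs ++ [PySem.List.pyGetD offs (-1) 0 + g]) (l ++ [c])
    = l ++ [c] ++ pvPsums c gs := by
  induction gs with
  | nil => intro l c; simp [pvPsums]
  | cons g gs ih =>
    intro l c
    simp only [List.foldl_cons, PySem.List.pyGetD_neg_one_append_singleton]
    rw [ih (l ++ [c]) (c + g)]
    simp [pvPsums]

theorem pv_psums_replicate (n : Nat) : ∀ (c v : Int),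
    pvPsums c (List.replicate n v) = (List.range n).map (fun (i : Nat) => c + ((i:Int) + 1) * v) := by
  induction n with
  | zero => intro c v; simp [pvPsums]
  | succ n ih =>
    intro c v
    rw [List.replicate_succ, List.range_succ_eq_map]
    simp only [pvPsums, ih, List.map_cons, List.map_map]
    refine List.cons_eq_cons.mpr ⟨by push_cast; ring, ?_⟩
    apply List.map_congr_left
    intro i _
    simp only [Function.comp_apply]
    push_cast
    ring

theorem pv_psums_append (g1 : List Int) : ∀ (c : Int) (g2 : List Int),
    pvPsums c (g1 ++ g2) = pvPsums c g1 ++ pvPsums (c + g1.sum) g2 := by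
  induction g1 with
  | nil => intro c g2; simp [pvPsums]
  | cons g g1 ih =>
    intro c g2
    simp only [List.cons_append, pvPsums, ih, List.sum_cons]
    rw [show c + (g + g1.sum) = c + g + g1.sum by ring]

-- the assembled final list equality: A's offsets = B's closed form, for kN = a + m groups
theorem pv_final (base : Int) (a m : Nat) :
    [0] ++ pvPsums 0 (List.replicate a base ++ List.replicate m (base + 1))
    = (List.range (a + m + 1)).map
        (fun (j : Nat) => ((j:Int)) * base + max 0 ((j:Int) - (a:Int))) := by
  rw [pv_psums_append, pv_psums_replicate, pv_psums_replicate]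
  simp only [List.sum_replicate, nsmul_eq_mul]
  apply List.ext_getElem
  · simp
  · intro i h1 h2
    simp only [List.getElem_map, List.getElem_range]
    rcases Nat.eq_zero_or_pos i with hi | hi
    · subst hi
      rw [List.getElem_append_left (by simp)]
      simp
    · rw [List.getElem_append_right (by simp; omega)]
      by_cases hia : i - 1 < a
      · rw [List.getElem_append_left (by simpa using hia)]
        simp only [List.getElem_map, List.getElem_range, List.length_singleton]
        have hmax : max 0 ((i:Int) - (a:Int)) = 0 := by omega
        have hc : ((i - 1 : Nat) : Int) + 1 = (i : Int) := by omega
        rw [hmax, hc]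
        ring
      · rw [List.getElem_append_right (by simp; omega)]
        simp only [List.getElem_map, List.getElem_range, List.length_singleton,
          List.length_map, List.length_range]
        have hmax : max 0 ((i:Int) - (a:Int)) = (i:Int) - (a:Int) := by omega
        have hc : ((i - 1 - a : Nat) : Int) + 1 = (i : Int) - (a : Int) := by omega
        rw [hmax, hc]
        ring

-- ===== VERDICT (by name: the statement is the Claim_ definition above) =====
theorem mixmatch_interleave_offsets_spec : Claim_equal_mixmatch_interleave_offsets := by
  intro batch nu _ hpre
  unfold Spec_mixmatch_interleave_offsets
  unfold Pre_mixmatch_interleave_offsets at hpre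
  unfold mixmatch_interleave_offsets mixmatch_interleave_offsets_alt
  simp only []
  set k : Int := nu + 1 with hk
  have hkpos : 0 < k := by omega
  set base : Int := PySem.Int.floordiv batch k with hbase
  set r : Int := PySem.Int.mod batch k with hr
  have hr0 : 0 ≤ r := PySem.Int.mod_nonneg batch hkpos
  have hrk : r < k := PySem.Int.mod_lt batch hkpos
  set kN : Nat := k.toNat with hkN
  have hkNc : (kN : Int) = k := by omega
  set rN : Nat := r.toNat with hrN
  have hrNc : (rN : Int) = r := by omega
  have hrNk : rN ≤ kN := by omega
  rw [PySem.List.pyRepeat_singleton]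
  have hsum : batch - (List.replicate (nu + 1).toNat base).sum = r := by
    have h1 := PySem.Int.floordiv_mul_add_mod batch k
    rw [List.sum_replicate, nsmul_eq_mul]
    have hc : (((nu + 1).toNat : Nat) : Int) = k := by omega
    rw [hc]
    linarith [mul_comm base k]
  rw [hsum, ← hrNc, show (nu + 1).toNat = kN by rw [hkN, hk],
      pv_incr_loop kN rN base hrNk rN le_rfl,
      show ([0] : List Int) = [] ++ [0] by rfl, pv_off_loop]
  have hfin := pv_final base (kN - rN) rN
  have hkNeq : kN - rN + rN = kN := by omega
  rw [hkNeq] at hfin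
  rw [List.nil_append, hfin, PySem.List.pyRange_one]
  have htoNat : (k + 1 - 0).toNat = kN + 1 := by omega
  rw [htoNat, List.map_map]
  apply List.map_congr_left
  intro j _
  simp only [Function.comp_apply, zero_add]
  have ha : ((kN - rN : Nat) : Int) = k - (rN : Int) := by omega
  rw [ha]
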